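-- pv_equiv track=rewrite | github.com/IDEMSInternational/collaboratorium | collaboratorium/component_factory.py | combine_lists_with_nones
-- ===== SOURCE A (Python) =====
-- def combine_lists_with_nones(lists):
--     if not lists:
--         return []
--
--     # Determine the length of the lists (assuming all have the same length)
--     list_length = len(lists[0])
--     combined_list = [None] * list_length  # Initialize with None or a default value
--
--     for i in range(list_length):
--         for current_list in lists:
--             if current_list[i] is not None:
--                 combined_list[i] = current_list[i]
--                 break  # Move to the next index once a non-None value is found
--     return combined_list
-- ===== SOURCE B (Python) =====
-- def combine_lists_with_nones(lists):
--     if not lists: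
--         return []
--     n = len(lists[0])
--     result = [None] * n
--     for current_list in reversed(lists):
--         for i in range(n):
--             if current_list[i] is not None:
--                 result[i] = current_list[i]
--     return result
-- ===== Notes on version B (the rewrite author's own statement) =====
-- stated objective: alternative
-- what changed: Instead of resolving each index with an inner scan over the lists that breaks at the first non-None, B maintains one running result array and applies the lists in reverse order, overwriting result[i] with every non-None value so earlier lists win.
-- outside the precondition, e.g. on combine_lists_with_nones([[1], []]): A returns [1], B raises IndexError
import Mathlib
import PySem

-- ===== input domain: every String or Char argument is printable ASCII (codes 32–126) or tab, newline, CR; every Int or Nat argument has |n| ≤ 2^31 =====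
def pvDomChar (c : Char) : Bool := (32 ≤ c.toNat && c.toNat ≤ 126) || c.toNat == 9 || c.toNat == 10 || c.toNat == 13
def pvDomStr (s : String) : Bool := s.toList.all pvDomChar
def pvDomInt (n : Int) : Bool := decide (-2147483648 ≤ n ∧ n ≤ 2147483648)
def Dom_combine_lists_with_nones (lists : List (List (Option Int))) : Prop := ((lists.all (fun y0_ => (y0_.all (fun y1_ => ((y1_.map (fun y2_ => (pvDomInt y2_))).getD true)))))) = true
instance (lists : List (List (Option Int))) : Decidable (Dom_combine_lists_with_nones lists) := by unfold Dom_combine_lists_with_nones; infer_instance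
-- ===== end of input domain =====

-- B replaces the per-index scan-with-break by a reverse-order overwrite of a running result array; return values proved equal on Pre_.

-- ===== PORT A =====
-- inner loop 'for current_list in lists: if current_list[i] is not None: combined_list[i] = …; break'
-- pyGet? = none is Python's IndexError (A raises): the port stops the scan there (outside Pre_ nothing is claimed)
def pvScanA (lists : List (List (Option Int))) (i : Int) : Option Int :=
  match lists with
  | [] => none
  | l :: rest =>
    match PySem.List.pyGet? l i with
    | some (some v) => some v
    | some none => pvScanA rest i
    | none => none

-- 'for i in range(list_length)': each slot of combined_list is set independently by the inner scan (or stays None)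
def combine_lists_with_nones (lists : List (List (Option Int))) : List (Option Int) :=
  match lists with
  | [] => []
  | first :: _ => (List.range first.length).map (fun (i : Nat) => pvScanA lists (i : Int))

-- ===== PORT B =====
-- inner loop of Source B: 'for i in range(n): if current_list[i] is not None: result[i] = current_list[i]'
-- pyGet? = none is Python's IndexError (B raises): the port skips the slot (outside Pre_ nothing is claimed)
def pvApplyB (cur : List (Option Int)) (n : Nat) (res : List (Option Int)) : List (Option Int) :=
  (List.range n).foldl (fun r (i : Nat) =>
    match PySem.List.pyGet? cur (i : Int) with
    | some (some v) => r.set i (some v)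
    | _ => r) res

def combine_lists_with_nones_alt (lists : List (List (Option Int))) : List (Option Int) :=
  match lists with
  | [] => []
  | first :: _ =>
    lists.reverse.foldl (fun r cur => pvApplyB cur first.length r)
      (List.replicate first.length none)

-- ===== PRECONDITION & SPEC =====
-- Pre_ excludes ragged inputs where some list is shorter than lists[0]: there Python B always raises
-- IndexError while Python A may return a value by the accident of an earlier break (or raise itself).
def Pre_combine_lists_with_nones (lists : List (List (Option Int))) : Prop :=
  ∀ l ∈ lists, (lists.headD []).length ≤ l.length
instance (lists : List (List (Option Int))) : Decidable (Pre_combine_lists_with_nones lists) := by unfold Pre_combine_lists_with_nones; infer_instance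
def pvWitness_combine_lists_with_nones : List (List (Option Int)) :=
  [[some 1, none], [none, some 2]]

def Spec_combine_lists_with_nones (lists : List (List (Option Int))) (out : List (Option Int)) : Prop := out = combine_lists_with_nones_alt lists
instance (lists : List (List (Option Int))) (out : List (Option Int)) : Decidable (Spec_combine_lists_with_nones lists out) := by unfold Spec_combine_lists_with_nones; infer_instance

-- ===== CLAIM (what is proved, stated in full; the proofs are below) =====
def Claim_equal_combine_lists_with_nones : Prop := ∀ (lists : List (List (Option Int))), Dom_combine_lists_with_nones lists → Pre_combine_lists_with_nones lists → Spec_combine_lists_with_nones lists (combine_lists_with_nones lists)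

-- ===== LEMMAS AND PROOFS =====

theorem pvApplyB_length (cur : List (Option Int)) (n : Nat) (res : List (Option Int)) :
    (pvApplyB cur n res).length = res.length := by
  unfold pvApplyB
  induction (List.range n) generalizing res with
  | nil => rfl
  | cons i is ih =>
    simp only [List.foldl_cons]
    rw [ih]
    cases h : PySem.List.pyGet? cur (i : Int) with
    | none => rfl
    | some o => cases o with
      | none => rfl
      | some v => simp

theorem pvApplyB_get (cur : List (Option Int)) (n : Nat) (res : List (Option Int)) (j : Nat) :
    (pvApplyB cur n res)[j]? =
      if j < n then
        res[j]?.map (fun old =>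
          match PySem.List.pyGet? cur (j : Int) with
          | some (some v) => some v
          | _ => old)
      else res[j]? := by
  induction n with
  | zero => unfold pvApplyB; rw [List.range_zero]; simp
  | succ m ih =>
    have hstep : pvApplyB cur (m + 1) res =
        (match PySem.List.pyGet? cur (m : Int) with
         | some (some v) => (pvApplyB cur m res).set m (some v)
         | _ => pvApplyB cur m res) := by
      unfold pvApplyB
      rw [List.range_succ, List.foldl_append]
      rfl
    rw [hstep]
    have hlen := pvApplyB_length cur m res
    by_cases hj : j = m
    · subst hj
      cases h : PySem.List.pyGet? cur (j : Int) with
      | none =>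
        simp only [ih]
        simp only [if_neg (lt_irrefl j), if_pos (Nat.lt_succ_self j)]
        cases hr : res[j]? <;> simp
      | some o => cases o with
        | none =>
          simp only [ih]
          simp only [if_neg (lt_irrefl j), if_pos (Nat.lt_succ_self j)]
          cases hr : res[j]? <;> simp
        | some v =>
          simp only [h]
          rw [List.getElem?_set_self', ih]
          rw [if_neg (lt_irrefl j), if_pos (Nat.lt_succ_self j)]
          cases res[j]? <;> rfl
    · have hset : ∀ v : Option Int, ((pvApplyB cur m res).set m v)[j]? = (pvApplyB cur m res)[j]? := by
        intro v; rw [List.getElem?_set_ne (by omega)]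
      have hmain : (match PySem.List.pyGet? cur (m : Int) with
         | some (some v) => (pvApplyB cur m res).set m (some v)
         | _ => pvApplyB cur m res)[j]? = (pvApplyB cur m res)[j]? := by
        cases h : PySem.List.pyGet? cur (m : Int) with
        | none => rfl
        | some o => cases o with
          | none => rfl
          | some v => exact hset (some v)
      rw [hmain, ih]
      by_cases hjm : j < m
      · rw [if_pos hjm, if_pos (by omega)]
      · rw [if_neg hjm, if_neg (by omega)]

theorem pvCore_get (lists : List (List (Option Int))) (n j : Nat) (hj : j < n)
    (hlen : ∀ l ∈ lists, n ≤ l.length) :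
    (lists.foldr (fun cur r => pvApplyB cur n r) (List.replicate n none))[j]? =
      some (pvScanA lists (j : Int)) := by
  induction lists with
  | nil => simp [pvScanA, hj]
  | cons l rest ih =>
    simp only [List.foldr_cons]
    rw [pvApplyB_get, if_pos hj]
    rw [ih (fun m hm => hlen m (List.mem_cons_of_mem _ hm))]
    have hl : n ≤ l.length := hlen l (List.mem_cons_self ..)
    have hget : PySem.List.pyGet? l (j : Int) = some l[j] := by
      rw [PySem.List.pyGet?_natCast]
      exact List.getElem?_eq_getElem (by omega)
    cases hv : l[j] <;> simp [pvScanA, hget, hv]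

theorem pvCore_length (lists : List (List (Option Int))) (n : Nat) :
    (lists.foldr (fun cur r => pvApplyB cur n r) (List.replicate n none)).length = n := by
  induction lists with
  | nil => simp
  | cons l rest ih => simp only [List.foldr_cons]; rw [pvApplyB_length, ih]

-- ===== VERDICT (by name: the statement is the Claim_ definition above) =====
theorem combine_lists_with_nones_spec : Claim_equal_combine_lists_with_nones := by
  intro lists _ hpre
  unfold Spec_combine_lists_with_nones
  cases lists with
  | nil => rfl
  | cons first rest =>
    simp only [combine_lists_with_nones, combine_lists_with_nones_alt]
    rw [List.foldl_reverse]
    have hlen : ∀ l ∈ first :: rest, first.length ≤ l.length := by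
      intro l hl
      simpa using hpre l hl
    apply List.ext_getElem?
    intro j
    by_cases hj : j < first.length
    · rw [pvCore_get (first :: rest) first.length j hj hlen]
      simp [List.getElem?_map, List.getElem?_range hj]
    · rw [List.getElem?_eq_none (by simpa using hj),
        List.getElem?_eq_none (by rw [pvCore_length]; omega)]
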